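-- pv_equiv track=rewrite | github.com/HumanFace-Tech/nichebench | src/nichebench/providers/conversation_manager.py | _is_repetitive_response
-- ===== SOURCE A (Python) =====
-- from typing import Any, Dict, List, Optional
--
-- def _is_repetitive_response(response: str) -> bool:
--     """Check if the response contains excessive repetition using simple substring detection."""
--     if len(response) < 1000:  # Only check longer responses
--         return False
--
--     # Split into chunks and look for repeated chunks
--     chunk_size = 100  # Look for 100-character repeated chunks
--     chunks = []
--
--     for i in range(0, len(response) - chunk_size, chunk_size // 2):  # Overlapping chunks
--         chunk = response[i : i + chunk_size].strip()
--         if len(chunk) >= chunk_size - 10:  # Only consider near-full chunks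
--             chunks.append(chunk)
--
--     # Count how many times each chunk appears
--     chunk_counts: Dict[str, int] = {}
--     for chunk in chunks:
--         chunk_counts[chunk] = chunk_counts.get(chunk, 0) + 1
--
--     # If any chunk appears more than 3 times, it's likely repetitive
--     max_repetitions = max(chunk_counts.values()) if chunk_counts else 0
--
--     if max_repetitions > 3:
--         return True
--
--     return False
-- ===== SOURCE B (Python) =====
-- def _is_repetitive_response(response: str) -> bool:
--     """Check if the response contains excessive repetition using simple substring detection."""
--     if len(response) < 1000:
--         return False
--     chunks = [
--         c
--         for c in (response[i : i + 100].strip() for i in range(0, len(response) - 100, 50))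
--         if len(c) >= 90
--     ]
--     # Sort-then-scan instead of a frequency table: after sorting, equal chunks are
--     # adjacent, so one linear pass tracking the longest run of equal neighbours
--     # finds the maximum multiplicity.
--     srt = sorted(chunks)
--     if not srt:
--         return False
--     prev = srt[0]
--     run = best = 1
--     for c in srt[1:]:
--         if c == prev:
--             run += 1
--         else:
--             prev, run = c, 1
--         if run > best:
--             best = run
--     return best > 3
-- ===== Notes on version B (the rewrite author's own statement) =====
-- stated objective: alternative
-- what changed: The dict histogram plus max-of-values pass is replaced by sorting the chunk list and making one linear pass that tracks the longest run of equal adjacent chunks, which equals the maximum multiplicity because sorting makes equal chunks adjacent.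
import Mathlib
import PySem

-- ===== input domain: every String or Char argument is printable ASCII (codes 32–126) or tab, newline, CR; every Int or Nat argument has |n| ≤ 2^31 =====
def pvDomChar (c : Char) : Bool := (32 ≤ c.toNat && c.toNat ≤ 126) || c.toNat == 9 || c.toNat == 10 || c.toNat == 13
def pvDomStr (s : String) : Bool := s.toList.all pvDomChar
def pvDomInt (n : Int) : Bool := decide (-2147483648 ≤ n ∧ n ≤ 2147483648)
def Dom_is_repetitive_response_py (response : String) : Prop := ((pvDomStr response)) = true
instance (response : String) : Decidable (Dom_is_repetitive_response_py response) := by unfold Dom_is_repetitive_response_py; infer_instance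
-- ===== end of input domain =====

-- B replaces A's dict histogram + max-of-values by sorting the chunk list and one
-- linear pass over the sorted list tracking the longest run of equal neighbours.

-- ===== PORT A =====
def is_repetitive_response_py (response : String) : Bool :=
  let cs := response.toList
  if cs.length < 1000 then false
  else
    let chunks : List (List Char) :=
      (PySem.List.pyRange 0 ((cs.length : Int) - 100) 50).foldl
        (fun acc i =>
          let chunk := PySem.Chars.strip (PySem.List.slice cs (some i) (some (i + 100)))
          if 90 ≤ chunk.length then acc ++ [chunk] else acc) []
    let counts := chunks.foldl (fun d c => d.insert c (d.getD c 0 + 1)) (PySem.Dict.empty : PySem.Dict (List Char) Int)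
    let maxRep : Int := match counts.values with | [] => 0 | v :: t => t.foldl max v
    decide (3 < maxRep)

-- ===== PORT B =====
def is_repetitive_response_py_alt (response : String) : Bool :=
  let cs := response.toList
  if cs.length < 1000 then false
  else
    let chunks : List (List Char) :=
      ((PySem.List.pyRange 0 ((cs.length : Int) - 100) 50).map
          (fun i => PySem.Chars.strip (PySem.List.slice cs (some i) (some (i + 100))))).filter
        (fun c => 90 ≤ c.length)
    match @PySem.List.sorted (List Char) (List Char) List.instLinearOrder.toLT
        LinearOrder.toDecidableLT chunks (fun x => x) false with
    | [] => false
    | x :: xs =>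
      decide (3 < (xs.foldl
        (fun (st : List Char × Nat × Nat) c =>
          let run' := if c = st.1 then st.2.1 + 1 else 1
          let prev' := if c = st.1 then st.1 else c
          (prev', run', max st.2.2 run')) (x, 1, 1)).2.2)

-- ===== PRECONDITION & SPEC =====
def Spec_is_repetitive_response_py (response : String) (out : Bool) : Prop := out = is_repetitive_response_py_alt response
instance (response : String) (out : Bool) : Decidable (Spec_is_repetitive_response_py response out) := by unfold Spec_is_repetitive_response_py; infer_instance

-- ===== CLAIM (what is proved, stated in full; the proofs are below) =====
def Claim_equal_is_repetitive_response_py : Prop := ∀ (response : String), Dom_is_repetitive_response_py response → Spec_is_repetitive_response_py response (is_repetitive_response_py response)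

-- ===== LEMMAS AND PROOFS =====

-- A's append-loop over the range builds exactly B's filtered map of the range.
theorem pv_chunks_eq (f : Int → List Char) (l : List Int) (acc : List (List Char)) :
    l.foldl
      (fun acc i =>
        let chunk := f i
        if 90 ≤ chunk.length then acc ++ [chunk] else acc) acc
    = acc ++ (l.map f).filter (fun c => 90 ≤ c.length) := by
  induction l generalizing acc with
  | nil => simp
  | cons i t ih =>
      simp only [List.foldl_cons, List.map_cons, List.filter_cons]
      by_cases h : 90 ≤ (f i).length
      · simp [h, ih]
      · simp [h, ih]

-- A's dict-histogram max exceeds 3 iff some chunk occurs more than 3 times.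
theorem pv_maxrep_eq_any (chunks : List (List Char)) :
    decide (3 < (match (chunks.foldl (fun d c => d.insert c (d.getD c 0 + 1))
        (PySem.Dict.empty : PySem.Dict (List Char) Int)).values with
      | [] => (0 : Int)
      | v :: t => t.foldl max v))
    = chunks.any (fun c => 3 < chunks.count c) := by
  rw [PySem.Dict.foldl_insert_getD_add_one_eq_counter]
  have hv : (PySem.Dict.counter chunks).values
      = (PySem.Set.ofList chunks).map (fun k => ((chunks.count k : Int))) := by
    show ((PySem.Dict.counter chunks).items.map Prod.snd)
        = (PySem.Set.ofList chunks).map (fun k => ((chunks.count k : Int)))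
    rw [PySem.Dict.items_counter, List.map_map]
    rfl
  rw [hv]
  rcases hS : (PySem.Set.ofList chunks).map (fun k => ((chunks.count k : Int))) with _ | ⟨v, t⟩
  · have hnil : chunks = [] := by
      cases hc : chunks with
      | nil => rfl
      | cons c cs =>
          exfalso
          have hm : c ∈ PySem.Set.ofList chunks := by
            rw [PySem.Set.mem_ofList, hc]; exact List.mem_cons_self ..
          have hmm : ((chunks.count c : Int)) ∈
              (PySem.Set.ofList chunks).map (fun k => ((chunks.count k : Int))) :=
            List.mem_map_of_mem hm
          rw [hS] at hmm
          simp at hmm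
    subst hnil
    simp
  · have hiff : (3 < t.foldl max v) ↔ ∃ c ∈ chunks, 3 < chunks.count c := by
      constructor
      · intro h3
        have hmem : t.foldl max v ∈ v :: t := by
          rcases PySem.List.foldl_max_mem t v with h | h
          · rw [h]; exact List.mem_cons_self ..
          · exact List.mem_cons_of_mem _ h
        rw [← hS] at hmem
        rcases List.mem_map.mp hmem with ⟨k, hk, hfk⟩
        refine ⟨k, (PySem.Set.mem_ofList _ _).mp hk, ?_⟩
        have : (3 : Int) < (chunks.count k : Int) := by rw [hfk]; exact h3
        exact_mod_cast this
      · rintro ⟨c, hc, h3⟩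
        have hm : ((chunks.count c : Int)) ∈ v :: t := by
          rw [← hS]
          exact List.mem_map_of_mem ((PySem.Set.mem_ofList _ _).mpr hc)
        have hle : ((chunks.count c : Int)) ≤ t.foldl max v := by
          rcases List.mem_cons.mp hm with h | h
          · rw [h]; exact (PySem.List.le_foldl_max t v).1
          · exact (PySem.List.le_foldl_max t v).2 _ h
        have h3' : (3 : Int) < (chunks.count c : Int) := by exact_mod_cast h3
        exact lt_of_lt_of_le h3' hle
    rw [Bool.eq_iff_iff]
    simp only [List.any_eq_true, decide_eq_true_eq]
    exact hiff

-- recursive form of B's run-scan loop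
def pvGo : List (List Char) → List Char → Nat → Nat → Nat
  | [], _, _, best => best
  | c :: cs, prev, run, best =>
    if c = prev then pvGo cs prev (run + 1) (max best (run + 1))
    else pvGo cs c 1 (max best 1)

theorem pv_foldl_eq_go (cs : List (List Char)) : ∀ (prev : List Char) (run best : Nat),
    (cs.foldl
      (fun (st : List Char × Nat × Nat) c =>
        let run' := if c = st.1 then st.2.1 + 1 else 1
        let prev' := if c = st.1 then st.1 else c
        (prev', run', max st.2.2 run')) (prev, run, best)).2.2
    = pvGo cs prev run best := by
  induction cs with
  | nil => intro prev run best; rfl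
  | cons c cs ih =>
      intro prev run best
      simp only [List.foldl_cons, pvGo]
      by_cases h : c = prev
      · simp only [h, if_true]; exact ih prev (run + 1) (max best (run + 1))
      · simp only [if_neg h]; exact ih c 1 (max best 1)

-- on a sorted remainder, the run-scan exceeding 3 means some element occurs > 3 times
theorem pv_go_iff (cs : List (List Char)) : ∀ (prev : List Char) (run best : Nat),
    (prev :: cs).Pairwise (· ≤ ·) → run ≤ best →
    (3 < pvGo cs prev run best ↔
      3 < best ∨ 3 < run + cs.count prev ∨ ∃ c ∈ cs, c ≠ prev ∧ 3 < cs.count c) := by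
  induction cs with
  | nil =>
      intro prev run best _ hrb
      simp only [pvGo, List.count_nil, List.not_mem_nil]
      constructor
      · intro h; exact Or.inl h
      · rintro (h | h | ⟨c, hc, _⟩)
        · exact h
        · omega
        · exact absurd hc (by simp)
  | cons c cs ih =>
      intro prev run best h hrb
      have hpc : prev ≤ c := (List.pairwise_cons.mp h).1 c (List.mem_cons_self ..)
      have htail : (c :: cs).Pairwise (· ≤ ·) := (List.pairwise_cons.mp h).2
      by_cases hc : c = prev
      · subst hc
        simp only [pvGo, if_true]
        rw [ih c (run + 1) (max best (run + 1)) htail (le_max_right _ _)]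
        have hcnt : (c :: cs).count c = cs.count c + 1 := by simp
        constructor
        · rintro (h1 | h2 | ⟨d, hd, hdne, hdc⟩)
          · rcases lt_max_iff.mp h1 with h1 | h1
            · exact Or.inl h1
            · exact Or.inr (Or.inl (by rw [hcnt]; omega))
          · exact Or.inr (Or.inl (by rw [hcnt]; omega))
          · refine Or.inr (Or.inr ⟨d, List.mem_cons_of_mem _ hd, hdne, ?_⟩)
            rw [List.count_cons_of_ne (Ne.symm hdne)]; exact hdc
        · rintro (h1 | h2 | ⟨d, hd, hdne, hdc⟩)
          · exact Or.inl (lt_max_iff.mpr (Or.inl h1))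
          · rw [hcnt] at h2; exact Or.inr (Or.inl (by omega))
          · rcases List.mem_cons.mp hd with rfl | hd'
            · exact absurd rfl hdne
            · refine Or.inr (Or.inr ⟨d, hd', hdne, ?_⟩)
              rw [List.count_cons_of_ne (Ne.symm hdne)] at hdc; exact hdc
      · have hplt : prev < c := lt_of_le_of_ne hpc (fun e => hc e.symm)
        have hne_all : ∀ x ∈ c :: cs, x ≠ prev := by
          intro x hx
          rcases List.mem_cons.mp hx with rfl | hx'
          · exact hc
          · have : c ≤ x := (List.pairwise_cons.mp htail).1 x hx'
            exact fun e => absurd (lt_of_lt_of_le hplt (e ▸ this)) (lt_irrefl prev)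
        have hcnt0 : (c :: cs).count prev = 0 := by
          rw [List.count_eq_zero]
          intro hmem
          exact hne_all prev hmem rfl
        simp only [pvGo, if_neg hc]
        rw [ih c 1 (max best 1) htail (le_max_right _ _)]
        rw [hcnt0]
        constructor
        · rintro (h1 | h2 | ⟨d, hd, hdne, hdc⟩)
          · rcases lt_max_iff.mp h1 with h1 | h1
            · exact Or.inl h1
            · omega
          · refine Or.inr (Or.inr ⟨c, List.mem_cons_self .., hc, ?_⟩)
            simp only [List.count_cons_self]; omega
          · refine Or.inr (Or.inr ⟨d, List.mem_cons_of_mem _ hd, hne_all d (List.mem_cons_of_mem _ hd), ?_⟩)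
            rw [List.count_cons_of_ne (Ne.symm hdne)]; exact hdc
        · rintro (h1 | h2 | ⟨d, hd, _, hdc⟩)
          · exact Or.inl (lt_max_iff.mpr (Or.inl h1))
          · exact Or.inl (lt_max_iff.mpr (Or.inl (lt_of_lt_of_le (by omega) hrb)))
          · rcases List.mem_cons.mp hd with rfl | hd'
            · simp only [List.count_cons_self] at hdc
              exact Or.inr (Or.inl (by omega))
            · by_cases hdc2 : d = c
              · subst hdc2
                simp only [List.count_cons_self] at hdc
                exact Or.inr (Or.inl (by omega))
              · rw [List.count_cons_of_ne (Ne.symm hdc2)] at hdc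
                exact Or.inr (Or.inr ⟨d, hd', hdc2, hdc⟩)

-- B's sort-and-scan equals "some chunk occurs more than 3 times".
theorem pv_scan_eq_any (chunks : List (List Char)) :
    (match @PySem.List.sorted (List Char) (List Char) List.instLinearOrder.toLT
        LinearOrder.toDecidableLT chunks (fun x => x) false with
    | [] => false
    | x :: xs =>
      decide (3 < (xs.foldl
        (fun (st : List Char × Nat × Nat) c =>
          let run' := if c = st.1 then st.2.1 + 1 else 1
          let prev' := if c = st.1 then st.1 else c
          (prev', run', max st.2.2 run')) (x, 1, 1)).2.2))
    = chunks.any (fun c => 3 < chunks.count c) := by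
  have hperm : (@PySem.List.sorted (List Char) (List Char) List.instLinearOrder.toLT
      LinearOrder.toDecidableLT chunks (fun x => x) false).Perm chunks :=
    @PySem.List.sorted_perm _ _ List.instLinearOrder.toLT LinearOrder.toDecidableLT chunks (fun x => x) false
  have hpair : (@PySem.List.sorted (List Char) (List Char) List.instLinearOrder.toLT
      LinearOrder.toDecidableLT chunks (fun x => x) false).Pairwise (· ≤ ·) :=
    PySem.List.sorted_pairwise chunks (fun x => x)
  rcases hs : @PySem.List.sorted (List Char) (List Char) List.instLinearOrder.toLT
      LinearOrder.toDecidableLT chunks (fun x => x) false with _ | ⟨x, xs⟩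
  · rw [hs] at hperm
    have : chunks = [] := hperm.symm.eq_nil
    subst this
    rfl
  · rw [hs] at hperm hpair
    dsimp only
    rw [pv_foldl_eq_go]
    rw [Bool.eq_iff_iff]
    simp only [decide_eq_true_eq, List.any_eq_true, decide_eq_true_eq]
    rw [pv_go_iff xs x 1 1 hpair (le_refl 1)]
    have hcnt : ∀ d, (x :: xs).count d = chunks.count d := fun d => hperm.count_eq d
    constructor
    · rintro (h1 | h2 | ⟨d, hd, hdne, hdc⟩)
      · omega
      · refine ⟨x, hperm.mem_iff.mp (List.mem_cons_self ..), ?_⟩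
        rw [← hcnt x]; simp only [List.count_cons_self]; omega
      · refine ⟨d, hperm.mem_iff.mp (List.mem_cons_of_mem _ hd), ?_⟩
        rw [← hcnt d, List.count_cons_of_ne (Ne.symm hdne)]; exact hdc
    · rintro ⟨d, hd, hdc⟩
      rw [← hcnt d] at hdc
      by_cases hdx : d = x
      · subst hdx
        simp only [List.count_cons_self] at hdc
        exact Or.inr (Or.inl (by omega))
      · have hd' : d ∈ xs := by
          rcases List.mem_cons.mp (hperm.mem_iff.mpr hd) with rfl | h
          · exact absurd rfl hdx
          · exact h
        rw [List.count_cons_of_ne (Ne.symm hdx)] at hdc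
        exact Or.inr (Or.inr ⟨d, hd', hdx, hdc⟩)

-- ===== VERDICT (by name: the statement is the Claim_ definition above) =====
theorem is_repetitive_response_py_spec : Claim_equal_is_repetitive_response_py := by
  intro response _
  show is_repetitive_response_py response = is_repetitive_response_py_alt response
  unfold is_repetitive_response_py is_repetitive_response_py_alt
  dsimp only
  by_cases h : response.toList.length < 1000
  · rw [if_pos h, if_pos h]
  · rw [if_neg h, if_neg h, pv_chunks_eq, List.nil_append, pv_maxrep_eq_any, pv_scan_eq_any]
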